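-- pv_equiv track=rewrite | github.com/bastiandg/projecteuler | problems/problem90.py | validDiceCombination
-- ===== SOURCE A (Python) =====
-- conditionList = { 0: [1, 4, 9], 1: [0, 6, 8], 2: [5], 3: [6], 4: [6, 9], 5: [2] }
--
-- def validDiceCombination(a, b):
-- 	if a == b:
-- 		return False
-- 	ab = a + b
--
-- 	for i in [0, 1, 2, 3, 4, 5, 6, 8, 9]:
-- 		if i not in ab:
-- 			return False
--
-- 	for key in conditionList.keys():
-- 		if key in a and key in b:
-- 			tmp = a + b
-- 		elif key in a:
-- 			tmp = b
-- 		else: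
-- 			tmp = a
-- 		for i in conditionList[key]:
-- 			if i not in tmp:
-- 				return False
-- 	return True
-- ===== SOURCE B (Python) =====
-- _SQUARES = [(0, 1), (0, 4), (0, 9), (1, 6), (1, 8), (2, 5), (3, 6), (4, 6), (4, 9)]
--
-- def validDiceCombination(a, b):
--     if a == b:
--         return False
--     return all((x in a and y in b) or (x in b and y in a) for x, y in _SQUARES)
-- ===== Notes on version B (the rewrite author's own statement) =====
-- stated objective: simpler
-- what changed: Replaces A's partner dict, tmp-die selection branching and separate all-digits pre-pass with a single pass over the nine squares as explicit digit pairs, requiring each pair to be split across the two dice.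
import Mathlib
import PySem

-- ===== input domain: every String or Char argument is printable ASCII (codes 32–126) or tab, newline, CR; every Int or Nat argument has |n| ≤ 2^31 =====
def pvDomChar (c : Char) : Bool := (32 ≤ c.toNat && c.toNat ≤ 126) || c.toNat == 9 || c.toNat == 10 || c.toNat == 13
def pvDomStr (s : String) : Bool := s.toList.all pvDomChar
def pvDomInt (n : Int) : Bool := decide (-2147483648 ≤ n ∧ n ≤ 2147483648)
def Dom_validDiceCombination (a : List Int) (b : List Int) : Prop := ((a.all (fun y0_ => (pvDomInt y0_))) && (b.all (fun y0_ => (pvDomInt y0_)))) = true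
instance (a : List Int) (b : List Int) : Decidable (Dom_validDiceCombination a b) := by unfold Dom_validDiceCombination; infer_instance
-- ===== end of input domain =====

-- B replaces A's partner dict, tmp-die selection branching and separate all-digits pre-pass
-- with one pass over the nine squares as explicit digit pairs (objective: simpler).

-- ===== PORT A =====
-- the module-level dict, as an association list in insertion order
def conditionList : List (Int × List Int) :=
  [(0, [1, 4, 9]), (1, [0, 6, 8]), (2, [5]), (3, [6]), (4, [6, 9]), (5, [2])]

def validDiceCombination (a : List Int) (b : List Int) : Bool :=
  if a = b then false
  else
    let ab := a ++ b
    -- first loop: early-return False unless every listed digit is in ab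
    if !(([0, 1, 2, 3, 4, 5, 6, 8, 9] : List Int).all (fun i => ab.contains i)) then false
    else
      -- second loop over the dict's keys, early-return False on a missing partner
      conditionList.all (fun kv =>
        let tmp := if a.contains kv.1 && b.contains kv.1 then a ++ b
                   else if a.contains kv.1 then b
                   else a
        kv.2.all (fun i => tmp.contains i))

-- ===== PORT B =====
def squaresB : List (Int × Int) :=
  [(0, 1), (0, 4), (0, 9), (1, 6), (1, 8), (2, 5), (3, 6), (4, 6), (4, 9)]

def validDiceCombination_alt (a : List Int) (b : List Int) : Bool :=
  if a = b then false
  else squaresB.all (fun p =>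
    (a.contains p.1 && b.contains p.2) || (b.contains p.1 && a.contains p.2))

-- ===== PRECONDITION & SPEC =====
def Spec_validDiceCombination (a : List Int) (b : List Int) (out : Bool) : Prop := out = validDiceCombination_alt a b
instance (a : List Int) (b : List Int) (out : Bool) : Decidable (Spec_validDiceCombination a b out) := by unfold Spec_validDiceCombination; infer_instance

-- ===== CLAIM (what is proved, stated in full; the proofs are below) =====
def Claim_equal_validDiceCombination : Prop := ∀ (a : List Int) (b : List Int), Dom_validDiceCombination a b → Spec_validDiceCombination a b (validDiceCombination a b)

-- ===== LEMMAS AND PROOFS =====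
theorem keylem (Ak Bk Ai Bi : Bool) (hk : (Ak || Bk) = true) (hi : (Ai || Bi) = true) :
    (if (Ak && Bk) = true then true else if Ak = true then Bi else Ai)
      = (Ak && Bi || Bk && Ai) := by
  cases Ak <;> cases Bk <;> cases Ai <;> cases Bi <;> simp_all

set_option maxHeartbeats 1000000

theorem validDiceCombination_eq (a b : List Int) :
    validDiceCombination a b = validDiceCombination_alt a b := by
  unfold validDiceCombination validDiceCombination_alt conditionList squaresB
  by_cases h : a = b
  · simp [h]
  simp only [if_neg h, List.all_cons, List.all_nil,
    apply_ite (fun l : List Int => l.contains (0:Int)),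
    apply_ite (fun l : List Int => l.contains (1:Int)),
    apply_ite (fun l : List Int => l.contains (2:Int)),
    apply_ite (fun l : List Int => l.contains (4:Int)),
    apply_ite (fun l : List Int => l.contains (5:Int)),
    apply_ite (fun l : List Int => l.contains (6:Int)),
    apply_ite (fun l : List Int => l.contains (8:Int)),
    apply_ite (fun l : List Int => l.contains (9:Int)),
    List.contains_append]
  generalize a.contains (0:Int) = A0
  generalize a.contains (1:Int) = A1
  generalize a.contains (2:Int) = A2
  generalize a.contains (3:Int) = A3
  generalize a.contains (4:Int) = A4
  generalize a.contains (5:Int) = A5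
  generalize a.contains (6:Int) = A6
  generalize a.contains (8:Int) = A8
  generalize a.contains (9:Int) = A9
  generalize b.contains (0:Int) = B0
  generalize b.contains (1:Int) = B1
  generalize b.contains (2:Int) = B2
  generalize b.contains (3:Int) = B3
  generalize b.contains (4:Int) = B4
  generalize b.contains (5:Int) = B5
  generalize b.contains (6:Int) = B6
  generalize b.contains (8:Int) = B8
  generalize b.contains (9:Int) = B9
  by_cases h0 : (A0 || B0) = true
  case neg =>
    simp only [Bool.or_eq_true, not_or, Bool.not_eq_true] at h0
    obtain ⟨hA, hB⟩ := h0; subst hA; subst hB; simp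
  by_cases h1 : (A1 || B1) = true
  case neg =>
    simp only [Bool.or_eq_true, not_or, Bool.not_eq_true] at h1
    obtain ⟨hA, hB⟩ := h1; subst hA; subst hB; simp
  by_cases h2 : (A2 || B2) = true
  case neg =>
    simp only [Bool.or_eq_true, not_or, Bool.not_eq_true] at h2
    obtain ⟨hA, hB⟩ := h2; subst hA; subst hB; simp
  by_cases h3 : (A3 || B3) = true
  case neg =>
    simp only [Bool.or_eq_true, not_or, Bool.not_eq_true] at h3
    obtain ⟨hA, hB⟩ := h3; subst hA; subst hB; simp
  by_cases h4 : (A4 || B4) = true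
  case neg =>
    simp only [Bool.or_eq_true, not_or, Bool.not_eq_true] at h4
    obtain ⟨hA, hB⟩ := h4; subst hA; subst hB; simp
  by_cases h5 : (A5 || B5) = true
  case neg =>
    simp only [Bool.or_eq_true, not_or, Bool.not_eq_true] at h5
    obtain ⟨hA, hB⟩ := h5; subst hA; subst hB; simp
  by_cases h6 : (A6 || B6) = true
  case neg =>
    simp only [Bool.or_eq_true, not_or, Bool.not_eq_true] at h6
    obtain ⟨hA, hB⟩ := h6; subst hA; subst hB; simp
  by_cases h8 : (A8 || B8) = true
  case neg =>
    simp only [Bool.or_eq_true, not_or, Bool.not_eq_true] at h8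
    obtain ⟨hA, hB⟩ := h8; subst hA; subst hB; simp
  by_cases h9 : (A9 || B9) = true
  case neg =>
    simp only [Bool.or_eq_true, not_or, Bool.not_eq_true] at h9
    obtain ⟨hA, hB⟩ := h9; subst hA; subst hB; simp
  simp only [h0, h1, h2, h3, h4, h5, h6, h8, h9]
  simp only [
    keylem A0 B0 A1 B1 h0 h1, keylem A0 B0 A4 B4 h0 h4, keylem A0 B0 A9 B9 h0 h9,
    keylem A1 B1 A0 B0 h1 h0, keylem A1 B1 A6 B6 h1 h6, keylem A1 B1 A8 B8 h1 h8,
    keylem A2 B2 A5 B5 h2 h5, keylem A3 B3 A6 B6 h3 h6,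
    keylem A4 B4 A6 B6 h4 h6, keylem A4 B4 A9 B9 h4 h9,
    keylem A5 B5 A2 B2 h5 h2,
    Bool.and_true, Bool.not_true, Bool.false_eq_true, if_false]
  rw [show (A1 && B0 || B1 && A0) = (A0 && B1 || B0 && A1) by
        cases A0 <;> cases A1 <;> cases B0 <;> cases B1 <;> rfl,
      show (A5 && B2 || B5 && A2) = (A2 && B5 || B2 && A5) by
        cases A2 <;> cases A5 <;> cases B2 <;> cases B5 <;> rfl]
  generalize (A0 && B1 || B0 && A1) = p01
  generalize (A0 && B4 || B0 && A4) = p04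
  generalize (A0 && B9 || B0 && A9) = p09
  generalize (A1 && B6 || B1 && A6) = p16
  generalize (A1 && B8 || B1 && A8) = p18
  generalize (A2 && B5 || B2 && A5) = p25
  generalize (A3 && B6 || B3 && A6) = p36
  generalize (A4 && B6 || B4 && A6) = p46
  generalize (A4 && B9 || B4 && A9) = p49
  revert p01 p04 p09 p16 p18 p25 p36 p46 p49
  decide

-- ===== VERDICT (by name: the statement is the Claim_ definition above) =====
theorem validDiceCombination_spec : Claim_equal_validDiceCombination := by
  intro a b _
  exact validDiceCombination_eq a b
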